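-- pv_equiv track=rewrite | github.com/haslamdb/asp_ai_agent | equity_analytics.py | _categorize_institution
-- ===== SOURCE A (Python) =====
-- def _categorize_institution(institution: str) -> str:
--     """Categorize institution type"""
--     if not institution:
--         return "unknown"
--
--     institution_lower = institution.lower()
--
--     if any(term in institution_lower for term in ['university', 'college', 'academic']):
--         return "academic"
--     elif any(term in institution_lower for term in ['community', 'regional']):
--         return "community"
--     elif 'va' in institution_lower or 'veteran' in institution_lower:
--         return "va"
--     elif any(term in institution_lower for term in ['children', 'pediatric']):
--         return "pediatric"
--     else:
--         return "other"
-- ===== SOURCE B (Python) =====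
-- TERM_TO_CATEGORY = {
--     "university": "academic",
--     "college": "academic",
--     "academic": "academic",
--     "community": "community",
--     "regional": "community",
--     "va": "va",
--     "veteran": "va",
--     "children": "pediatric",
--     "pediatric": "pediatric",
-- }
--
-- PRIORITY = ("academic", "community", "va", "pediatric")
--
--
-- def _categorize_institution(institution: str) -> str:
--     """Exhaustively collect every matching category, then pick the highest-priority one."""
--     if not institution:
--         return "unknown"
--     low = institution.lower()
--     hits = {cat for term, cat in TERM_TO_CATEGORY.items() if term in low}
--     for cat in PRIORITY:
--         if cat in hits:
--             return cat
--     return "other"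
-- ===== Notes on version B (the rewrite author's own statement) =====
-- stated objective: alternative
-- what changed: Instead of a short-circuiting if/elif chain, B first exhaustively computes the set of ALL categories whose terms occur in the string (a flat term-to-category map), then selects the highest-priority category from that set in a second pass.
import Mathlib
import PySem

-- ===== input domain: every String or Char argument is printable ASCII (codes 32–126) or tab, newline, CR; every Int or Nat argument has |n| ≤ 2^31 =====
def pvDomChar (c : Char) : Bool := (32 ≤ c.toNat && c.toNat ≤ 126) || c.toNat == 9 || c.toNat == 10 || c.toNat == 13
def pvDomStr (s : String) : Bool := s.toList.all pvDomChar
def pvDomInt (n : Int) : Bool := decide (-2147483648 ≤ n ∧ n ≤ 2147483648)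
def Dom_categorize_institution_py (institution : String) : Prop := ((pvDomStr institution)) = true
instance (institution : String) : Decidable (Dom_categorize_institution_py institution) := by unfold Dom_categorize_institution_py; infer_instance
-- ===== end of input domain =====

-- B first exhaustively collects the set of ALL matching categories via a flat term→category map, then picks the highest-priority one in a second pass (alternative decomposition; same cost).

-- ===== PORT A =====
def categorize_institution_py (institution : String) : String :=
  if institution == "" then "unknown"
  else
    let institution_lower := PySem.Str.lower institution
    if ["university", "college", "academic"].any (fun term => PySem.Str.isIn term institution_lower) then "academic"
    else if ["community", "regional"].any (fun term => PySem.Str.isIn term institution_lower) then "community"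
    else if PySem.Str.isIn "va" institution_lower || PySem.Str.isIn "veteran" institution_lower then "va"
    else if ["children", "pediatric"].any (fun term => PySem.Str.isIn term institution_lower) then "pediatric"
    else "other"

-- ===== PORT B =====
def pvTermToCategory : List (String × String) :=
  [("university", "academic"), ("college", "academic"), ("academic", "academic"),
   ("community", "community"), ("regional", "community"),
   ("va", "va"), ("veteran", "va"),
   ("children", "pediatric"), ("pediatric", "pediatric")]

def pvPriority : List String := ["academic", "community", "va", "pediatric"]

-- the set comprehension {cat for term, cat in TERM_TO_CATEGORY.items() if term in low}
def pvHits (low : String) : PySem.Set String :=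
  PySem.Set.ofList ((pvTermToCategory.filter (fun p => PySem.Str.isIn p.1 low)).map Prod.snd)

-- the selection loop 'for cat in PRIORITY: if cat in hits: return cat' with fall-through "other"
def pvSelect (hits : PySem.Set String) : List String → String
  | [] => "other"
  | cat :: rest => if hits.contains cat then cat else pvSelect hits rest

def categorize_institution_py_alt (institution : String) : String :=
  if institution == "" then "unknown"
  else pvSelect (pvHits (PySem.Str.lower institution)) pvPriority

-- ===== PRECONDITION & SPEC =====
def Spec_categorize_institution_py (institution : String) (out : String) : Prop := out = categorize_institution_py_alt institution
instance (institution : String) (out : String) : Decidable (Spec_categorize_institution_py institution out) := by unfold Spec_categorize_institution_py; infer_instance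

-- ===== CLAIM =====
def Claim_equal_categorize_institution_py : Prop := ∀ (institution : String), Dom_categorize_institution_py institution → Spec_categorize_institution_py institution (categorize_institution_py institution)

-- ===== LEMMAS AND PROOFS =====

-- membership of each category in the hits set equals the disjunction of its terms' substring tests
theorem hits_academic (low : String) :
    (pvHits low).contains "academic" =
      (PySem.Str.isIn "university" low || PySem.Str.isIn "college" low || PySem.Str.isIn "academic" low) := by
  have h : (pvHits low).contains "academic" = true ↔
      "academic" ∈ ((pvTermToCategory.filter (fun p => PySem.Str.isIn p.1 low)).map Prod.snd) :=
    Iff.trans (PySem.Set.contains_iff _ _) (PySem.Set.mem_ofList _ _)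
  rw [Bool.eq_iff_iff, h]
  simp [pvTermToCategory, List.mem_filter]
  tauto

theorem hits_community (low : String) :
    (pvHits low).contains "community" =
      (PySem.Str.isIn "community" low || PySem.Str.isIn "regional" low) := by
  have h : (pvHits low).contains "community" = true ↔
      "community" ∈ ((pvTermToCategory.filter (fun p => PySem.Str.isIn p.1 low)).map Prod.snd) :=
    Iff.trans (PySem.Set.contains_iff _ _) (PySem.Set.mem_ofList _ _)
  rw [Bool.eq_iff_iff, h]
  simp [pvTermToCategory, List.mem_filter]

theorem hits_va (low : String) :
    (pvHits low).contains "va" =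
      (PySem.Str.isIn "va" low || PySem.Str.isIn "veteran" low) := by
  have h : (pvHits low).contains "va" = true ↔
      "va" ∈ ((pvTermToCategory.filter (fun p => PySem.Str.isIn p.1 low)).map Prod.snd) :=
    Iff.trans (PySem.Set.contains_iff _ _) (PySem.Set.mem_ofList _ _)
  rw [Bool.eq_iff_iff, h]
  simp [pvTermToCategory, List.mem_filter]

theorem hits_pediatric (low : String) :
    (pvHits low).contains "pediatric" =
      (PySem.Str.isIn "children" low || PySem.Str.isIn "pediatric" low) := by
  have h : (pvHits low).contains "pediatric" = true ↔
      "pediatric" ∈ ((pvTermToCategory.filter (fun p => PySem.Str.isIn p.1 low)).map Prod.snd) :=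
    Iff.trans (PySem.Set.contains_iff _ _) (PySem.Set.mem_ofList _ _)
  rw [Bool.eq_iff_iff, h]
  simp [pvTermToCategory, List.mem_filter]

-- ===== VERDICT =====
theorem categorize_institution_py_spec : Claim_equal_categorize_institution_py := by
  intro institution _
  unfold Spec_categorize_institution_py categorize_institution_py categorize_institution_py_alt
  by_cases h : institution == ""
  · simp [h]
  · simp only [h, if_false, Bool.false_eq_true, pvSelect, pvPriority, List.any_cons, List.any_nil,
      hits_academic, hits_community, hits_va, hits_pediatric, Bool.or_false]
    split_ifs <;> simp_all
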